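-- pv_equiv track=rewrite | github.com/harrisdudu/AI-Ready-MCP | 2-语料预处理Agent/8-QA算子/data-engine-dev/data-engine-dev/wx/exams_pdf_cot/3.1_qa_apart/3.1.2_qa_apart_extract.py | compress_chunk_text
-- ===== SOURCE A (Python) =====
-- MAX_CHARS_PER_PROMPT = 9000
--
-- def compress_chunk_text(s: str, max_chars: int = MAX_CHARS_PER_PROMPT) -> str:
--     lines = s.replace("\r", "").splitlines()
--     out = []
--     blank = 0
--     for ln in lines:
--         ln = " ".join(ln.split())
--         if not ln:
--             blank += 1
--             if blank > 1:
--                 continue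
--         else:
--             blank = 0
--         out.append(ln)
--     s2 = "\n".join(out).strip()
--     return s2[:max_chars] if len(s2) > max_chars else s2
-- ===== SOURCE B (Python) =====
-- from itertools import groupby
--
-- MAX_CHARS_PER_PROMPT = 9000
--
-- def compress_chunk_text(s: str, max_chars: int = MAX_CHARS_PER_PROMPT) -> str:
--     lines = [" ".join(ln.split()) for ln in s.replace("\r", "").splitlines()]
--     kept = []
--     for is_blank, grp in groupby(lines, key=lambda ln: ln == ""):
--         kept.extend([""] if is_blank else list(grp))
--     return "\n".join(kept).strip()[:max_chars]
-- ===== Notes on version B (the rewrite author's own statement) =====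
-- stated objective: idiomatic
-- what changed: Replaces A's single stateful loop with a blank-line counter by an itertools.groupby pipeline (normalize all lines, group consecutive lines by blankness, emit one empty line per blank group) and drops the redundant length test before [:max_chars].
import Mathlib
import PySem

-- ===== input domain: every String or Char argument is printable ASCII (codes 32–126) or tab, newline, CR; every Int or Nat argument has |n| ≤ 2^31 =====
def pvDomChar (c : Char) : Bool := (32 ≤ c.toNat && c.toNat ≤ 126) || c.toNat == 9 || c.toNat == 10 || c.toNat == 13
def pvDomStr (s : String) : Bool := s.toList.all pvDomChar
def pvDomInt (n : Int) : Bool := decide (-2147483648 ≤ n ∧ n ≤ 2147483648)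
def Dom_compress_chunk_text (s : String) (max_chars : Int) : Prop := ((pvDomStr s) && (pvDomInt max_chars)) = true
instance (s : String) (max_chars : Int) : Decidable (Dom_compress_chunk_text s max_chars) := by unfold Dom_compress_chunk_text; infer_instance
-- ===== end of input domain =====

-- B replaces A's stateful blank-counter loop by a groupby pipeline (group consecutive
-- lines by blankness, emit one "" per blank group) and drops the length test before
-- truncation (s2[:max_chars] is already s2 when len(s2) ≤ max_chars); objective: idiomatic.

-- ===== PORT A =====
def compress_chunk_text (s : String) (max_chars : Int) : String :=
  let lines := PySem.Str.splitlines (PySem.Str.replace s "\r" "")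
  let st := lines.foldl
    (fun (st : List String × Int) ln0 =>
      let ln := PySem.Str.join " " (PySem.Str.split₀ ln0)
      if ln = "" then
        let blank := st.2 + 1
        if blank > 1 then (st.1, blank) else (st.1 ++ [ln], blank)
      else (st.1 ++ [ln], 0))
    ([], 0)
  let s2 := PySem.Str.strip (PySem.Str.join "\n" st.1)
  if (PySem.Str.len s2 : Int) > max_chars then PySem.Str.slice s2 none (some max_chars) else s2

-- ===== PORT B =====
-- itertools.groupby on key (ln == ""): consecutive runs with equal key, in order
def pvGroupsBlank : List String → List (Bool × List String)
  | [] => []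
  | x :: xs =>
    match pvGroupsBlank xs with
    | (b, g) :: rest =>
        if (x == "") = b then (b, x :: g) :: rest
        else (x == "", [x]) :: (b, g) :: rest
    | [] => [(x == "", [x])]

def compress_chunk_text_alt (s : String) (max_chars : Int) : String :=
  let lines := (PySem.Str.splitlines (PySem.Str.replace s "\r" "")).map
      (fun ln => PySem.Str.join " " (PySem.Str.split₀ ln))
  let kept := (pvGroupsBlank lines).foldl
      (fun acc g => acc ++ (if g.1 then [""] else g.2)) []
  PySem.Str.slice (PySem.Str.strip (PySem.Str.join "\n" kept)) none (some max_chars)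

-- ===== PRECONDITION & SPEC =====
def Spec_compress_chunk_text (s : String) (max_chars : Int) (out : String) : Prop := out = compress_chunk_text_alt s max_chars
instance (s : String) (max_chars : Int) (out : String) : Decidable (Spec_compress_chunk_text s max_chars out) := by unfold Spec_compress_chunk_text; infer_instance

-- ===== CLAIM (what is proved, stated in full; the proofs are below) =====
def Claim_equal_compress_chunk_text : Prop := ∀ (s : String) (max_chars : Int), Dom_compress_chunk_text s max_chars → Spec_compress_chunk_text s max_chars (compress_chunk_text s max_chars)

-- ===== LEMMAS AND PROOFS =====

-- the lines A's loop keeps, as a function of (current blank counter, remaining normalized lines)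
def pvKeep : Int → List String → List String
  | _, [] => []
  | blank, ln :: t =>
      if ln = "" then
        (if blank + 1 > 1 then [] else [ln]) ++ pvKeep (blank + 1) t
      else ln :: pvKeep 0 t

def pvF (g : Bool × List String) : List String := if g.1 then [""] else g.2

def pvFlat (gs : List (Bool × List String)) : List String := gs.flatMap pvF

def pvBehead : List (Bool × List String) → List (Bool × List String)
  | (true, _) :: rest => rest
  | gs => gs

theorem pvFoldB (gs : List (Bool × List String)) :
    gs.foldl (fun acc g => acc ++ (if g.1 then [""] else g.2)) [] = pvFlat gs := by
  rw [PySem.List.foldl_append_eq_flatMap]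
  rfl

theorem pvFoldA (ls : List String) : ∀ (out : List String) (blank : Int),
    (ls.foldl
      (fun (st : List String × Int) ln0 =>
        let ln := PySem.Str.join " " (PySem.Str.split₀ ln0)
        if ln = "" then
          let b := st.2 + 1
          if b > 1 then (st.1, b) else (st.1 ++ [ln], b)
        else (st.1 ++ [ln], 0)) (out, blank)).1
    = out ++ pvKeep blank (ls.map (fun ln0 => PySem.Str.join " " (PySem.Str.split₀ ln0))) := by
  induction ls with
  | nil => intro out blank; simp [pvKeep]
  | cons ln0 t ih =>
      intro out blank
      simp only [List.foldl_cons, List.map_cons, pvKeep]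
      by_cases h : PySem.Str.join " " (PySem.Str.split₀ ln0) = ""
      · by_cases hb : blank + 1 > 1
        · simpa [h, hb] using ih out (blank + 1)
        · simpa [h, hb] using ih (out ++ [PySem.Str.join " " (PySem.Str.split₀ ln0)]) (blank + 1)
      · simpa [h] using ih (out ++ [PySem.Str.join " " (PySem.Str.split₀ ln0)]) 0

theorem pvGroups_blank (t : List String) :
    pvFlat (pvGroupsBlank ("" :: t)) = "" :: pvFlat (pvBehead (pvGroupsBlank t)) ∧
    pvBehead (pvGroupsBlank ("" :: t)) = pvBehead (pvGroupsBlank t) := by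
  simp only [pvGroupsBlank]
  cases hg : pvGroupsBlank t with
  | nil => simp [pvFlat, pvBehead, pvF]
  | cons g rest =>
      obtain ⟨gb, gl⟩ := g
      cases gb with
      | true => simp [pvFlat, pvBehead, pvF]
      | false => simp [pvFlat, pvBehead, pvF]

theorem pvGroups_nonblank (x : String) (t : List String) (h : x ≠ "") :
    pvFlat (pvGroupsBlank (x :: t)) = x :: pvFlat (pvGroupsBlank t) ∧
    pvBehead (pvGroupsBlank (x :: t)) = pvGroupsBlank (x :: t) := by
  have hx : (x == "") = false := by simpa using h
  simp only [pvGroupsBlank, hx]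
  cases hg : pvGroupsBlank t with
  | nil => simp [pvFlat, pvBehead, pvF]
  | cons g rest =>
      obtain ⟨gb, gl⟩ := g
      cases gb with
      | true => simp [pvFlat, pvBehead, pvF]
      | false => simp [pvFlat, pvBehead, pvF]

theorem pvKeep_groups (t : List String) :
    pvKeep 0 t = pvFlat (pvGroupsBlank t) ∧
    ∀ b : Int, 1 ≤ b → pvKeep b t = pvFlat (pvBehead (pvGroupsBlank t)) := by
  induction t with
  | nil => exact ⟨rfl, fun _ _ => rfl⟩
  | cons x t ih =>
      obtain ⟨ih0, ih1⟩ := ih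
      by_cases h : x = ""
      · subst h
        obtain ⟨hf, hb⟩ := pvGroups_blank t
        constructor
        · rw [hf]
          have h1 : pvKeep 0 ("" :: t) = "" :: pvKeep 1 t := by norm_num [pvKeep]
          rw [h1, ih1 1 le_rfl]
        · intro b hb1
          rw [hb]
          have h1 : pvKeep b ("" :: t) = pvKeep (b + 1) t := by
            simp only [pvKeep]
            rw [if_pos trivial, if_pos (by omega : b + 1 > 1)]
            simp
          rw [h1, ih1 (b + 1) (by omega)]
      · obtain ⟨hf, hbe⟩ := pvGroups_nonblank x t h
        have key : ∀ b : Int, pvKeep b (x :: t) = x :: pvFlat (pvGroupsBlank t) := by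
          intro b
          simp only [pvKeep, if_neg h, ih0]
        exact ⟨by rw [key 0, hf], fun b _ => by rw [key b, hbe, hf]⟩

theorem pvSliceIdem (s2 : String) (m : Int) :
    (if (PySem.Str.len s2 : Int) > m then PySem.Str.slice s2 none (some m) else s2)
      = PySem.Str.slice s2 none (some m) := by
  by_cases h : (PySem.Str.len s2 : Int) > m
  · rw [if_pos h]
  · rw [if_neg h]
    have hlen : (s2.toList.length : Int) ≤ m := by
      simpa [PySem.Str.len_eq, PySem.Chars.len_eq] using not_lt.mp h
    have hm : 0 ≤ m := le_trans (by positivity) hlen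
    apply String.toList_inj.mp
    simp only [PySem.Str.toList_slice, PySem.Chars.slice_eq_listSlice,
      PySem.List.slice_to _ hm]
    exact (List.take_of_length_le (by omega)).symm

-- ===== VERDICT (by name: the statement is the Claim_ definition above) =====
theorem compress_chunk_text_spec : Claim_equal_compress_chunk_text := by
  intro s max_chars _
  unfold Spec_compress_chunk_text compress_chunk_text compress_chunk_text_alt
  simp only []
  rw [pvFoldA, pvFoldB, (pvKeep_groups _).1, List.nil_append, pvSliceIdem]
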